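-- pv_equiv track=rewrite | github.com/alexhernandezgarcia/gflownet | gflownet/envs/tree/calculate_nbr_of_trees.py | count_decision_trees
-- ===== SOURCE A (Python) =====
-- def count_decision_trees(
--     max_depth: int,
--     num_features: int,
--     num_thresholds: int = 1,
--     allow_empty: bool = False,
-- ) -> int:
--     """
--     Count the number of structurally distinct binary decision trees
--     of depth at most `max_depth` over `num_features` features
--     and `num_thresholds` thresholds per feature, where leaves are unlabeled.
--
--     Recursion (with thresholds):
--         N(D) = 1 + F * T * N(D-1)^2,  N(0) = 1
--
--     If `allow_empty` is False, the leaf-only tree (no split at the root)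
--     is excluded from the final count, so the result is N(D) - 1.
--     Subtrees within the tree may still be leaves — only the root is
--     required to be a split.
--     """
--     if max_depth < 1:
--         raise ValueError(
--             "max_depth must be at least 1 when the empty tree is disallowed"
--         )
--     if num_features < 1:
--         raise ValueError("num_features must be at least 1")
--     if num_thresholds < 1:
--         raise ValueError("num_thresholds must be at least 1")
--
--     label_choices = num_features * num_thresholds
--
--     n = 1  # N(0): a single leaf
--     for _ in range(max_depth):
--         n = 1 + label_choices * n * n
--
--     if not allow_empty:
--         n -= 1  # remove the leaf-only tree
--
--     return n
-- ===== SOURCE B (Python) =====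
-- def count_decision_trees(
--     max_depth: int,
--     num_features: int,
--     num_thresholds: int = 1,
--     allow_empty: bool = False,
-- ) -> int:
--     if max_depth < 1:
--         raise ValueError(
--             "max_depth must be at least 1 when the empty tree is disallowed"
--         )
--     if num_features < 1:
--         raise ValueError("num_features must be at least 1")
--     if num_thresholds < 1:
--         raise ValueError("num_thresholds must be at least 1")
--
--     label_choices = num_features * num_thresholds
--
--     def n_trees(d):
--         if d == 0:
--             return 1
--         s = n_trees(d - 1)
--         return 1 + label_choices * s * s
--
--     n = n_trees(max_depth)
--     return n if allow_empty else n - 1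
-- ===== Notes on version B (the rewrite author's own statement) =====
-- stated objective: alternative
-- what changed: The iterative accumulator loop over range(max_depth) is replaced by a recursive helper n_trees(d) that directly mirrors the docstring recurrence N(0)=1, N(d)=1+label_choices*N(d-1)^2, and the allow_empty adjustment becomes a conditional expression.
import Mathlib
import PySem

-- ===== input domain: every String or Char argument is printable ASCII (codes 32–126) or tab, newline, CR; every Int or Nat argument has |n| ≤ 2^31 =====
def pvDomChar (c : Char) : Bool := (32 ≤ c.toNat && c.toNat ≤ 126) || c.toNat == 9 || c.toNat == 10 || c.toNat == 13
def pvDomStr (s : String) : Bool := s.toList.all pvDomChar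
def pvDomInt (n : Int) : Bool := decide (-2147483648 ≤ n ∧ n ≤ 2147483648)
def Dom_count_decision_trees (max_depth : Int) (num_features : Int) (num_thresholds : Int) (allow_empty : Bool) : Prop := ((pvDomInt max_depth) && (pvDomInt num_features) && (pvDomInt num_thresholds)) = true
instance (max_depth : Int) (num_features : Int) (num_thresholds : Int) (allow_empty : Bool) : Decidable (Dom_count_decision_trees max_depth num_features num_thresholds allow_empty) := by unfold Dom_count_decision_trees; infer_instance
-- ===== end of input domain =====

-- B replaces A's iterative accumulator loop with a recursive helper mirroring the
-- docstring recurrence N(0)=1, N(d)=1+label_choices*N(d-1)^2 (objective: alternative).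


-- ===== PORT A =====
-- A's validation guards raise ValueError; those inputs are excluded by Pre_ below,
-- so the port transcribes the body after the guards.
def count_decision_trees (max_depth : Int) (num_features : Int) (num_thresholds : Int) (allow_empty : Bool) : Int :=
  let label_choices := num_features * num_thresholds
  let n : Int := (PySem.List.pyRange 0 max_depth 1).foldl (fun n _ => 1 + label_choices * n * n) 1
  let n := if !allow_empty then n - 1 else n
  n

-- ===== PORT B =====
-- B's recursive helper n_trees(d); d ranges over the naturals reached from max_depth ≥ 1.
def pvNTrees (label_choices : Int) : Nat → Int
  | 0 => 1
  | d + 1 =>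
      let s := pvNTrees label_choices d
      1 + label_choices * s * s

def count_decision_trees_alt (max_depth : Int) (num_features : Int) (num_thresholds : Int) (allow_empty : Bool) : Int :=
  let label_choices := num_features * num_thresholds
  let n := pvNTrees label_choices max_depth.toNat
  if allow_empty then n else n - 1

-- ===== PRECONDITION & SPEC =====
-- Pre_ excludes exactly the inputs on which A raises ValueError (its three guards).
def Pre_count_decision_trees (max_depth : Int) (num_features : Int) (num_thresholds : Int) (allow_empty : Bool) : Prop :=
  1 ≤ max_depth ∧ 1 ≤ num_features ∧ 1 ≤ num_thresholds
instance (max_depth : Int) (num_features : Int) (num_thresholds : Int) (allow_empty : Bool) : Decidable (Pre_count_decision_trees max_depth num_features num_thresholds allow_empty) := by unfold Pre_count_decision_trees; infer_instance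
def pvWitness_count_decision_trees : Int × Int × Int × Bool := (2, 3, 1, false)
def Spec_count_decision_trees (max_depth : Int) (num_features : Int) (num_thresholds : Int) (allow_empty : Bool) (out : Int) : Prop := out = count_decision_trees_alt max_depth num_features num_thresholds allow_empty
instance (max_depth : Int) (num_features : Int) (num_thresholds : Int) (allow_empty : Bool) (out : Int) : Decidable (Spec_count_decision_trees max_depth num_features num_thresholds allow_empty out) := by unfold Spec_count_decision_trees; infer_instance

-- ===== CLAIM (what is proved, stated in full; the proofs are below) =====
def Claim_equal_count_decision_trees : Prop := ∀ (max_depth : Int) (num_features : Int) (num_thresholds : Int) (allow_empty : Bool), Dom_count_decision_trees max_depth num_features num_thresholds allow_empty → Pre_count_decision_trees max_depth num_features num_thresholds allow_empty → Spec_count_decision_trees max_depth num_features num_thresholds allow_empty (count_decision_trees max_depth num_features num_thresholds allow_empty)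

-- ===== LEMMAS AND PROOFS =====

-- A fold over a list with a function that ignores the elements only depends on the length.
theorem pv_foldl_const {α : Type} (f : Int → Int) (l : List α) (init : Int) :
    l.foldl (fun n _ => f n) init = f^[l.length] init := by
  induction l generalizing init with
  | nil => rfl
  | cons x xs ih => simp [List.foldl_cons, ih, Function.iterate_succ_apply]

theorem pv_nTrees_iterate (label : Int) (d : Nat) :
    pvNTrees label d = (fun n => 1 + label * n * n)^[d] 1 := by
  induction d with
  | zero => rfl
  | succ d ih => rw [Function.iterate_succ_apply']; simp [pvNTrees, ih]

-- ===== VERDICT (by name: the statement is the Claim_ definition above) =====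
theorem count_decision_trees_spec : Claim_equal_count_decision_trees := by
  intro md nf nt ae _hdom hpre
  unfold Spec_count_decision_trees count_decision_trees count_decision_trees_alt
  simp only [pv_foldl_const, PySem.List.length_pyRange_one, pv_nTrees_iterate, Int.sub_zero]
  cases ae <;> simp
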